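-- pv_equiv track=rewrite | github.com/kayatsa8/NumericalMethods | Errors/API.py | validateRequestSchema
-- ===== SOURCE A (Python) =====
-- from typing import Callable, Dict, List
--
-- def validateRequestSchema(request: dict, schema: List[str]) -> bool:
--     for field in schema:
--         if field not in request:
--             return False
--
--     for key in request:
--         if key not in schema:
--             return False
--
--     return True
-- ===== SOURCE B (Python) =====
-- from typing import Callable, Dict, List
--
-- def validateRequestSchema(request: dict, schema: List[str]) -> bool:
--     # Canonicalise each side to a sorted list of its distinct keys/fields,
--     # then compare the two canonical forms element-wise.
--     return sorted(set(request)) == sorted(set(schema))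
-- ===== Notes on version B (the rewrite author's own statement) =====
-- stated objective: alternative
-- what changed: Instead of two early-return membership scans, B canonicalises both sides (deduplicate, then sort) and compares the two sorted key lists element-wise; this sort-then-compare strategy maintains no per-element membership state.
import Mathlib
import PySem

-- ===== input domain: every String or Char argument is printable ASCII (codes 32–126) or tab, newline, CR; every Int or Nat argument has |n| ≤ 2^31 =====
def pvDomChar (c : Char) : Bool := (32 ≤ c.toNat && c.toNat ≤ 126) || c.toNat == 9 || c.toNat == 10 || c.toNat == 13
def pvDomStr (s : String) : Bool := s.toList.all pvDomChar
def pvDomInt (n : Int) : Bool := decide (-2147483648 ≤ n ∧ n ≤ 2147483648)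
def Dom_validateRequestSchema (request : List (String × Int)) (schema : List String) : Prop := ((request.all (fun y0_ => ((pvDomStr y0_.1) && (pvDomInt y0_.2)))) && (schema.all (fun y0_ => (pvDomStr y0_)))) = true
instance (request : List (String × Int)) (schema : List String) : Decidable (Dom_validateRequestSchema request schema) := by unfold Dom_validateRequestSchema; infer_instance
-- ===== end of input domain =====

-- B replaces A's two early-return membership scans by canonicalisation:
-- deduplicate and sort both key lists, then compare them element-wise (alternative decomposition).

-- ===== PORT A =====
-- second loop: 'for key in request: if key not in schema: return False' then 'return True'
def vrsLoop2 (schema : List String) : List (String × Int) → Bool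
  | [] => true
  | (key, _) :: rest =>
      if schema.contains key then vrsLoop2 schema rest else false

-- first loop: 'for field in schema: if field not in request: return False', falling through to the second loop
def vrsLoop1 (request : List (String × Int)) (schema : List String) : List String → Bool
  | [] => vrsLoop2 schema request
  | field :: rest =>
      if request.any (fun p => p.1 == field) then vrsLoop1 request schema rest else false

def validateRequestSchema (request : List (String × Int)) (schema : List String) : Bool :=
  vrsLoop1 request schema schema

-- ===== PORT B =====
-- sorted(set(request)) == sorted(set(schema))
def validateRequestSchema_alt (request : List (String × Int)) (schema : List String) : Bool :=
  PySem.List.sorted (PySem.Set.ofList (request.map Prod.fst)) (fun x => x) false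
    == PySem.List.sorted (PySem.Set.ofList schema) (fun x => x) false

-- ===== PRECONDITION & SPEC =====
def Spec_validateRequestSchema (request : List (String × Int)) (schema : List String) (out : Bool) : Prop := out = validateRequestSchema_alt request schema
instance (request : List (String × Int)) (schema : List String) (out : Bool) : Decidable (Spec_validateRequestSchema request schema out) := by unfold Spec_validateRequestSchema; infer_instance

-- ===== CLAIM (what is proved, stated in full; the proofs are below) =====
def Claim_equal_validateRequestSchema : Prop := ∀ (request : List (String × Int)) (schema : List String), Dom_validateRequestSchema request schema → Spec_validateRequestSchema request schema (validateRequestSchema request schema)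

-- ===== LEMMAS AND PROOFS =====

theorem vrsLoop2_eq_true_iff (schema : List String) (req : List (String × Int)) :
    vrsLoop2 schema req = true ↔ ∀ p ∈ req, p.1 ∈ schema := by
  induction req with
  | nil => simp [vrsLoop2]
  | cons p rest ih =>
      obtain ⟨k, v⟩ := p
      simp only [vrsLoop2]
      split_ifs with h
      · simp_all
      · simp_all

theorem vrsLoop1_eq_true_iff (request : List (String × Int)) (schema : List String)
    (fields : List String) :
    vrsLoop1 request schema fields = true ↔
      ((∀ f ∈ fields, f ∈ request.map Prod.fst) ∧ vrsLoop2 schema request = true) := by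
  induction fields with
  | nil => simp [vrsLoop1]
  | cons f rest ih =>
      simp only [vrsLoop1]
      split_ifs with h
      · simp only [List.any_eq_true, beq_iff_eq] at h
        obtain ⟨p, hp, hpe⟩ := h
        constructor
        · intro h1
          rw [ih] at h1
          refine ⟨?_, h1.2⟩
          intro g hg
          rcases List.mem_cons.1 hg with hg | hg
          · subst hg; exact List.mem_map.2 ⟨p, hp, hpe⟩
          · exact h1.1 g hg
        · intro h1
          rw [ih]
          exact ⟨fun g hg => h1.1 g (List.mem_cons_of_mem _ hg), h1.2⟩
      · simp only [List.any_eq_true, beq_iff_eq] at h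
        constructor
        · intro hF; cases hF
        · rintro ⟨h1, _⟩
          rcases List.mem_map.1 (h1 f (List.mem_cons_self)) with ⟨p, hp, hpe⟩
          exact absurd ⟨p, hp, hpe⟩ h

-- B = true ↔ the two key sets have the same members
theorem alt_eq_true_iff (request : List (String × Int)) (schema : List String) :
    validateRequestSchema_alt request schema = true ↔
      ∀ x, x ∈ request.map Prod.fst ↔ x ∈ schema := by
  unfold validateRequestSchema_alt
  rw [beq_iff_eq, PySem.List.sorted_id_eq_sorted_id_iff_perm]
  rw [List.perm_ext_iff_of_nodup (PySem.Set.nodup_ofList _) (PySem.Set.nodup_ofList _)]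
  simp only [PySem.Set.mem_ofList]

-- ===== VERDICT (by name: the statement is the Claim_ definition above) =====
theorem validateRequestSchema_spec : Claim_equal_validateRequestSchema := by
  intro request schema _
  unfold Spec_validateRequestSchema validateRequestSchema
  by_cases hA : vrsLoop1 request schema schema = true
  · rw [hA]
    rw [vrsLoop1_eq_true_iff] at hA
    obtain ⟨h1, h2⟩ := hA
    rw [vrsLoop2_eq_true_iff] at h2
    symm
    rw [alt_eq_true_iff]
    intro x
    constructor
    · rintro hx
      rcases List.mem_map.1 hx with ⟨p, hp, hpe⟩
      subst hpe; exact h2 p hp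
    · intro hx
      exact h1 x hx
  · rw [Bool.not_eq_true] at hA
    rw [hA]
    symm
    rw [Bool.eq_false_iff]
    intro hB
    rw [alt_eq_true_iff] at hB
    apply absurd _ (Bool.eq_false_iff.1 hA)
    rw [vrsLoop1_eq_true_iff, vrsLoop2_eq_true_iff]
    constructor
    · intro f hf
      exact (hB f).2 hf
    · intro p hp
      exact (hB p.1).1 (List.mem_map.2 ⟨p, hp, rfl⟩)
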